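-- pv_equiv track=rewrite | github.com/oyako-li/Scraper | src/search_words.py | resize_data
-- ===== SOURCE A (Python) =====
-- def resize_data(_data:dict)->list:
--     _results = []
--     for key in _data:
--         _labels = _data[key]['labels']
--         _words = _labels.split(' ')
--         _results += _words
--
--     _results = list(dict.fromkeys(_results))
--     return _results
-- ===== SOURCE B (Python) =====
-- def resize_data(_data: dict) -> list:
--     # selection-style dedup: repeatedly take the first word and filter out its later duplicates
--     ws = [w for key in _data for w in _data[key]['labels'].split(' ')]
--     result = []
--     while ws:
--         head = ws[0]
--         result.append(head)
--         ws = [w for w in ws[1:] if w != head]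
--     return result
-- ===== Notes on version B (the rewrite author's own statement) =====
-- stated objective: alternative
-- what changed: Replaced collect-then-dict.fromkeys with a selection-style dedup: repeatedly take the first remaining word and filter all its later duplicates out of the rest, so no dict or set is used at all.
import Mathlib
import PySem

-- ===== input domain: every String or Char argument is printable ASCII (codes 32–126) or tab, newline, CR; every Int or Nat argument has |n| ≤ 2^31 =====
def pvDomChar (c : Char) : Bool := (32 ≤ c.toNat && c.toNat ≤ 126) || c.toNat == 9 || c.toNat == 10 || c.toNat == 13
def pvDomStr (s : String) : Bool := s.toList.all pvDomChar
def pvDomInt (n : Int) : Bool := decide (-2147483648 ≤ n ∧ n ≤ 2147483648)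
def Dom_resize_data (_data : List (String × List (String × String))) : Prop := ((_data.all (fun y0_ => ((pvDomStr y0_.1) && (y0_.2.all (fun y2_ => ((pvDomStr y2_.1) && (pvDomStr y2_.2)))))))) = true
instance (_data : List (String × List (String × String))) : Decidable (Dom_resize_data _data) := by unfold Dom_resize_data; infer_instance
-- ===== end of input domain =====

-- B replaces A's collect-then-dict.fromkeys with a selection-style dedup (repeatedly take the
-- first word, filter out its later duplicates); same return value, no set/dict used.

-- ===== PORT A =====
-- for key in _data: _results += _data[key]['labels'].split(' '); then list(dict.fromkeys(_results))
def resize_data (_data : List (String × List (String × String))) : List String :=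
  let results := (PySem.Dict.mk _data).keys.foldl (fun acc key =>
    match (PySem.Dict.mk _data).get? key with
    | none => acc
    | some inner =>
      match (PySem.Dict.mk inner).get? "labels" with
      | none => acc  -- KeyError in Python; excluded by Pre_
      | some labels => acc ++ ((PySem.Str.split? labels " ").getD [])) []
  PySem.List.dedup results

-- ===== PORT B =====
-- while ws: head = ws[0]; result.append(head); ws = [w for w in ws[1:] if w != head]
def pvSelDedup (ws : List String) (result : List String) : List String :=
  match ws with
  | [] => result
  | head :: rest => pvSelDedup (rest.filter (fun w => w ≠ head)) (result ++ [head])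
termination_by ws.length
decreasing_by
  simp only [List.length_unattach, List.length_cons]
  exact Nat.lt_succ_of_le (le_trans (List.length_filter_le _ _) (by simp))

-- ws = [w for key in _data for w in _data[key]['labels'].split(' ')]
def resize_data_alt (_data : List (String × List (String × String))) : List String :=
  let ws := (PySem.Dict.mk _data).keys.flatMap (fun key =>
    match (PySem.Dict.mk _data).get? key with
    | none => []
    | some inner =>
      match (PySem.Dict.mk inner).get? "labels" with
      | none => []  -- KeyError in Python; excluded by Pre_
      | some labels => ((PySem.Str.split? labels " ").getD []))
  pvSelDedup ws []

-- ===== PRECONDITION & SPEC =====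
-- Pre_ excludes association lists with duplicate keys (outer or inner), which do not represent a
-- Python dict (dict construction collapses them), and inputs where some value lacks the 'labels'
-- key, on which A raises KeyError.
def Pre_resize_data (_data : List (String × List (String × String))) : Prop :=
  (_data.map Prod.fst).Nodup ∧
  ∀ p ∈ _data, (p.2.map Prod.fst).Nodup ∧ "labels" ∈ p.2.map Prod.fst
instance (_data : List (String × List (String × String))) : Decidable (Pre_resize_data _data) := by
  unfold Pre_resize_data; infer_instance
def pvWitness_resize_data : (List (String × List (String × String))) :=
  [("k", [("labels", "a b a")]), ("j", [("labels", "b c")])]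
def Spec_resize_data (_data : List (String × List (String × String))) (out : List String) : Prop :=
  out = resize_data_alt _data
instance (_data : List (String × List (String × String))) (out : List String) : Decidable (Spec_resize_data _data out) := by unfold Spec_resize_data; infer_instance

-- ===== CLAIM =====
def Claim_equal_resize_data : Prop := ∀ (_data : List (String × List (String × String))), Dom_resize_data _data → Pre_resize_data _data → Spec_resize_data _data (resize_data _data)

-- ===== LEMMAS AND PROOFS =====

-- A's collection loop equals the flatMap B's comprehension builds
theorem pv_A_fold (d : PySem.Dict String (List (String × String)))
    (ks : List String) (acc : List String) :
    ks.foldl (fun acc key =>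
      match d.get? key with
      | none => acc
      | some inner =>
        match (PySem.Dict.mk inner).get? "labels" with
        | none => acc
        | some labels => acc ++ ((PySem.Str.split? labels " ").getD [])) acc
    = acc ++ ks.flatMap (fun key =>
        match d.get? key with
        | none => []
        | some inner =>
          match (PySem.Dict.mk inner).get? "labels" with
          | none => []
          | some labels => ((PySem.Str.split? labels " ").getD [])) := by
  induction ks generalizing acc with
  | nil => simp
  | cons k ks ih =>
    simp only [List.foldl_cons, List.flatMap_cons, ih]
    cases hd : d.get? k with
    | none => simp
    | some inner =>
      cases hl : (PySem.Dict.mk inner).get? "labels" with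
      | none => simp [hl]
      | some labels => simp [hl, List.append_assoc]

-- adding over a set already containing h ignores the h's in the tail
theorem pv_foldl_add_filter (h : String) (t : List String) (s : PySem.Set String)
    (hs : h ∈ s) :
    t.foldl PySem.Set.add s = (t.filter (fun w => w ≠ h)).foldl PySem.Set.add s := by
  induction t generalizing s with
  | nil => rfl
  | cons w t ih =>
    simp only [List.foldl_cons, List.filter_cons]
    by_cases hw : w = h
    · subst hw
      rw [PySem.Set.add_of_mem hs, if_neg (by simp)]
      exact ih s hs
    · rw [if_pos (by simp [hw])]
      simp only [List.foldl_cons]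
      exact ih _ (by simp [PySem.Set.mem_add, hs])

-- a head no element of t equals floats out of the fold
theorem pv_foldl_add_cons (h : String) (t : List String) (s : PySem.Set String)
    (ht : ∀ w ∈ t, w ≠ h) :
    t.foldl PySem.Set.add (h :: s) = h :: t.foldl PySem.Set.add s := by
  induction t generalizing s with
  | nil => rfl
  | cons w t ih =>
    have hw : w ≠ h := ht w (by simp)
    simp only [List.foldl_cons]
    have hc : PySem.Set.add (h :: s) w = h :: PySem.Set.add s w := by
      unfold PySem.Set.add
      by_cases hm : w ∈ s
      · rw [if_pos, if_pos]
        · exact (PySem.Set.contains_iff _ _).mpr hm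
        · exact (PySem.Set.contains_iff _ _).mpr (by simp [hm])
      · rw [if_neg, if_neg] <;> simp_all
    rw [hc]
    exact ih _ (fun w hwm => ht w (by simp [hwm]))

-- dedup peels its head and the head's duplicates
theorem pv_dedup_cons (h : String) (t : List String) :
    PySem.List.dedup (h :: t) = h :: PySem.List.dedup (t.filter (fun w => w ≠ h)) := by
  rw [PySem.List.dedup_eq_ofList, PySem.List.dedup_eq_ofList,
      PySem.Set.ofList_eq_foldl, PySem.Set.ofList_eq_foldl]
  simp only [List.foldl_cons]
  have h1 : PySem.Set.add ([] : PySem.Set String) h = [h] := rfl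
  rw [h1, pv_foldl_add_filter h t [h] (by simp),
      show ([h] : List String) = h :: [] from rfl,
      pv_foldl_add_cons h _ []]
  intro w hw
  simp only [List.mem_filter, decide_not] at hw
  simpa using hw.2

-- the selection loop computes acc ++ dedup
theorem pv_selDedup_eq (n : Nat) :
    ∀ ws acc, ws.length ≤ n → pvSelDedup ws acc = acc ++ PySem.List.dedup ws := by
  induction n with
  | zero =>
    intro ws acc hlen
    have : ws = [] := List.length_eq_zero_iff.mp (Nat.le_zero.mp hlen)
    subst this; simp [pvSelDedup]
  | succ n ih =>
    intro ws acc hlen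
    match ws with
    | [] => simp [pvSelDedup]
    | head :: rest =>
      rw [pvSelDedup, pv_dedup_cons]
      rw [ih _ _ (le_trans (List.length_filter_le _ _) (Nat.le_of_succ_le_succ hlen))]
      simp

-- ===== VERDICT =====
theorem resize_data_spec : Claim_equal_resize_data := by
  intro _data _hdom _hpre
  unfold Spec_resize_data resize_data resize_data_alt
  rw [pv_A_fold, pv_selDedup_eq (_ : List String).length _ _ le_rfl]
  simp
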